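-- pv_equiv track=rewrite | github.com/joshuavictorchen/autologic | scripts/msr_export_attribute_mapper.py | map_msr_export_work_assignments_to_autologic
-- ===== SOURCE A (Python) =====
-- MSR_TO_AUTOLOGIC_MEMBER_ATTRIBUTE_MAP = {
--     "Timing & Scoring": "timing",
--     "Grid": "grid",
--     "Starter": "start",
--     "Corner Captain": "captain",
--     "Gate": "gate",
-- }
--
-- def map_msr_export_work_assignments_to_autologic(name: str, assignments: list[str]):
--     """
--     Converts work assignments from an MSR export to the autologic member attribute names
--
--     Args:
--         name (str): The name of the registrant
--         assignments (list[str]): A list of work assignments they've elected in MSR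
--     Returns:
--         dict[str, str]: The autologic member attributes with their name and empty strings for unelected attributes
--     """
--     return {
--         "name": name,
--         "instructor": "",
--         **{
--             autologic_attribute_value: (
--                 "TRUE" if msr_assignment_key in assignments else ""
--             )
--             for msr_assignment_key, autologic_attribute_value in MSR_TO_AUTOLOGIC_MEMBER_ATTRIBUTE_MAP.items()
--         },
--     }
-- ===== SOURCE B (Python) =====
-- MSR_TO_AUTOLOGIC_MEMBER_ATTRIBUTE_MAP = {
--     "Timing & Scoring": "timing",
--     "Grid": "grid",
--     "Starter": "start",
--     "Corner Captain": "captain",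
--     "Gate": "gate",
-- }
--
-- def map_msr_export_work_assignments_to_autologic(name, assignments):
--     # scatter: pre-populate every attribute empty, then mark the elected ones
--     result = {"name": name, "instructor": ""}
--     for attribute in MSR_TO_AUTOLOGIC_MEMBER_ATTRIBUTE_MAP.values():
--         result[attribute] = ""
--     for assignment in assignments:
--         attribute = MSR_TO_AUTOLOGIC_MEMBER_ATTRIBUTE_MAP.get(assignment)
--         if attribute is not None:
--             result[attribute] = "TRUE"
--     return result
-- ===== Notes on version B (the rewrite author's own statement) =====
-- stated objective: alternative
-- what changed: Inverts A's gather (iterate the fixed attribute map, test membership in assignments) into a scatter: pre-populate the result with name, instructor and all five attributes set to '', then iterate the assignments list once, marking matched attributes 'TRUE' via a map lookup.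
import Mathlib
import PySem

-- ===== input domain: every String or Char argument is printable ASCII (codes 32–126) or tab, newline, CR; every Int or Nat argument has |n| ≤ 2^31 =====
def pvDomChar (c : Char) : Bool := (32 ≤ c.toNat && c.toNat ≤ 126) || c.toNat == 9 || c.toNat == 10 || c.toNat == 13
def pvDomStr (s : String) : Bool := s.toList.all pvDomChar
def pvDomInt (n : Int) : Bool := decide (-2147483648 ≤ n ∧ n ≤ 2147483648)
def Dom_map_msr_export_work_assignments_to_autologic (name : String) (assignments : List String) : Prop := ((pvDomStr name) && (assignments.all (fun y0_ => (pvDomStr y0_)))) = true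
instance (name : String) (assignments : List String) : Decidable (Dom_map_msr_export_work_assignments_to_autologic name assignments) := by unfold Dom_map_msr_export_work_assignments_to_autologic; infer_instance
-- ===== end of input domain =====

-- B replaces A's gather (loop the fixed attribute map, test membership in assignments) by a scatter
-- (pre-populate every attribute empty, then loop over the assignments marking matches): alternative decomposition.

-- ===== PORT A =====
-- the module-level map MSR_TO_AUTOLOGIC_MEMBER_ATTRIBUTE_MAP, as an insertion-ordered association list
def msrMap : List (String × String) :=
  [("Timing & Scoring", "timing"), ("Grid", "grid"), ("Starter", "start"),
   ("Corner Captain", "captain"), ("Gate", "gate")]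

-- {"name": name, "instructor": "", **{attr: ("TRUE" if key in assignments else "") for key, attr in map.items()}}
def map_msr_export_work_assignments_to_autologic (name : String) (assignments : List String) : List (String × String) :=
  let inner : PySem.Dict String String :=
    msrMap.foldl (fun d kv => d.insert kv.2 (if assignments.contains kv.1 then "TRUE" else "")) PySem.Dict.empty
  let base : PySem.Dict String String := (PySem.Dict.empty.insert "name" name).insert "instructor" ""
  (inner.items.foldl (fun d kv => d.insert kv.1 kv.2) base).items

-- ===== PORT B =====
def map_msr_export_work_assignments_to_autologic_alt (name : String) (assignments : List String) : List (String × String) :=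
  let result0 : PySem.Dict String String := (PySem.Dict.empty.insert "name" name).insert "instructor" ""
  let result1 : PySem.Dict String String :=
    ((PySem.Dict.ofList msrMap).values).foldl (fun d attr => d.insert attr "") result0
  let result2 : PySem.Dict String String :=
    assignments.foldl (fun d a =>
      match (PySem.Dict.ofList msrMap).get? a with
      | some attr => d.insert attr "TRUE"
      | none => d) result1
  result2.items

-- ===== PRECONDITION & SPEC =====
def Spec_map_msr_export_work_assignments_to_autologic (name : String) (assignments : List String) (out : List (String × String)) : Prop := out = map_msr_export_work_assignments_to_autologic_alt name assignments
instance (name : String) (assignments : List String) (out : List (String × String)) : Decidable (Spec_map_msr_export_work_assignments_to_autologic name assignments out) := by unfold Spec_map_msr_export_work_assignments_to_autologic; infer_instance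

-- ===== CLAIM (what is proved, stated in full; the proofs are below) =====
def Claim_equal_map_msr_export_work_assignments_to_autologic : Prop := ∀ (name : String) (assignments : List String), Dom_map_msr_export_work_assignments_to_autologic name assignments → Spec_map_msr_export_work_assignments_to_autologic name assignments (map_msr_export_work_assignments_to_autologic name assignments)

-- ===== LEMMAS AND PROOFS =====

-- the common shape of both running dictionaries: name, instructor, and the five attributes
def gDict (name v1 v2 v3 v4 v5 : String) : PySem.Dict String String :=
  PySem.Dict.mk [("name", name), ("instructor", ""), ("timing", v1), ("grid", v2),
                 ("start", v3), ("captain", v4), ("gate", v5)]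

lemma msr_get_none (a : String) (h1 : a ≠ "Timing & Scoring") (h2 : a ≠ "Grid")
    (h3 : a ≠ "Starter") (h4 : a ≠ "Corner Captain") (h5 : a ≠ "Gate") :
    (PySem.Dict.ofList msrMap).get? a = none := by
  have hm : PySem.Dict.ofList msrMap = PySem.Dict.mk msrMap := rfl
  rw [hm]
  simp [msrMap, PySem.Dict.get?_mk_cons, PySem.Dict.get?,
        Ne.symm h1, Ne.symm h2, Ne.symm h3, Ne.symm h4, Ne.symm h5]

lemma ins_timing (name v1 v2 v3 v4 v5 : String) :
    (gDict name v1 v2 v3 v4 v5).insert "timing" "TRUE" = gDict name "TRUE" v2 v3 v4 v5 := rfl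
lemma ins_grid (name v1 v2 v3 v4 v5 : String) :
    (gDict name v1 v2 v3 v4 v5).insert "grid" "TRUE" = gDict name v1 "TRUE" v3 v4 v5 := rfl
lemma ins_start (name v1 v2 v3 v4 v5 : String) :
    (gDict name v1 v2 v3 v4 v5).insert "start" "TRUE" = gDict name v1 v2 "TRUE" v4 v5 := rfl
lemma ins_captain (name v1 v2 v3 v4 v5 : String) :
    (gDict name v1 v2 v3 v4 v5).insert "captain" "TRUE" = gDict name v1 v2 v3 "TRUE" v5 := rfl
lemma ins_gate (name v1 v2 v3 v4 v5 : String) :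
    (gDict name v1 v2 v3 v4 v5).insert "gate" "TRUE" = gDict name v1 v2 v3 v4 "TRUE" := rfl

lemma scatter_loop (name : String) (assignments : List String) (v1 v2 v3 v4 v5 : String) :
    assignments.foldl (fun d a =>
      match (PySem.Dict.ofList msrMap).get? a with
      | some attr => d.insert attr "TRUE"
      | none => d) (gDict name v1 v2 v3 v4 v5)
    = gDict name
        (if assignments.contains "Timing & Scoring" then "TRUE" else v1)
        (if assignments.contains "Grid" then "TRUE" else v2)
        (if assignments.contains "Starter" then "TRUE" else v3)
        (if assignments.contains "Corner Captain" then "TRUE" else v4)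
        (if assignments.contains "Gate" then "TRUE" else v5) := by
  induction assignments generalizing v1 v2 v3 v4 v5 with
  | nil => simp
  | cons a as ih =>
    by_cases h1 : a = "Timing & Scoring"
    · subst h1
      simp only [List.foldl_cons, show (PySem.Dict.ofList msrMap).get? "Timing & Scoring" = some "timing" from rfl,
                 ins_timing, ih]
      simp
    · by_cases h2 : a = "Grid"
      · subst h2
        simp only [List.foldl_cons, show (PySem.Dict.ofList msrMap).get? "Grid" = some "grid" from rfl,
                   ins_grid, ih]
        simp
      · by_cases h3 : a = "Starter"
        · subst h3
          simp only [List.foldl_cons, show (PySem.Dict.ofList msrMap).get? "Starter" = some "start" from rfl,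
                     ins_start, ih]
          simp
        · by_cases h4 : a = "Corner Captain"
          · subst h4
            simp only [List.foldl_cons, show (PySem.Dict.ofList msrMap).get? "Corner Captain" = some "captain" from rfl,
                       ins_captain, ih]
            simp
          · by_cases h5 : a = "Gate"
            · subst h5
              simp only [List.foldl_cons, show (PySem.Dict.ofList msrMap).get? "Gate" = some "gate" from rfl,
                         ins_gate, ih]
              simp
            · simp only [List.foldl_cons, msr_get_none a h1 h2 h3 h4 h5, ih]
              simp [Ne.symm h1, Ne.symm h2, Ne.symm h3, Ne.symm h4, Ne.symm h5]

-- ===== VERDICT (by name: the statement is the Claim_ definition above) =====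
theorem map_msr_export_work_assignments_to_autologic_spec : Claim_equal_map_msr_export_work_assignments_to_autologic := by
  intro name assignments _
  unfold Spec_map_msr_export_work_assignments_to_autologic
  have hA : map_msr_export_work_assignments_to_autologic name assignments
      = (gDict name (if assignments.contains "Timing & Scoring" then "TRUE" else "")
          (if assignments.contains "Grid" then "TRUE" else "")
          (if assignments.contains "Starter" then "TRUE" else "")
          (if assignments.contains "Corner Captain" then "TRUE" else "")
          (if assignments.contains "Gate" then "TRUE" else "")).items := rfl
  have hB : map_msr_export_work_assignments_to_autologic_alt name assignments
      = (assignments.foldl (fun d a =>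
          match (PySem.Dict.ofList msrMap).get? a with
          | some attr => d.insert attr "TRUE"
          | none => d) (gDict name "" "" "" "" "")).items := rfl
  rw [hA, hB, scatter_loop]
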